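-- pv_equiv track=rewrite | github.com/liupengsay/PyIsTheBestLang | src/structure/linked_list/problem.py | lc_2617_1
-- ===== SOURCE A (Python) =====
-- import math
-- from collections import deque
-- from typing import List
--
-- def lc_2617_1(grid: List[List[int]]) -> int:
--     """
--     url: https://leetcode.cn/problems/minimum-number-of-visited-cells-in-a-grid/
--     tag: bfs|double_linked_list|classical|reverse_order|reverse_thinking|tree_array|segment_tree|flatten
--     """
--     m, n = len(grid), len(grid[0])
--     dis = [[math.inf] * n for _ in range(m)]
--     row_nex = [list(range(1, n + 1)) for _ in range(m)]
--     col_nex = [list(range(1, m + 1)) for _ in range(n)]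
--     stack = deque([[0, 0]])
--     dis[0][0] = 1
--
--     while stack:
--         i, j = stack.popleft()
--         d = dis[i][j]
--         x = grid[i][j]
--         if x == 0:
--             continue
--
--         nex = row_nex[i]
--         y = nex[j]
--         lst = []
--         while y <= j + x and 0 <= y < n:
--             if dis[i][y] == math.inf:
--                 dis[i][y] = d + 1
--                 if i == m - 1 and y == n - 1:
--                     return d + 1
--                 stack.append([i, y])
--             lst.append(y)
--             y = nex[y]
--         for w in lst:
--             nex[w] = y
--
--         nex = col_nex[j]
--         y = nex[i]
--         lst = []
--         while y <= i + x and 0 <= y < m: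
--             if dis[y][j] == math.inf:
--                 dis[y][j] = d + 1
--                 if y == m - 1 and j == n - 1:
--                     return d + 1
--                 stack.append([y, j])
--             lst.append(y)
--             y = nex[y]
--         for w in lst:
--             nex[w] = y
--
--     ans = dis[-1][-1]
--     return ans if ans < math.inf else -1
-- ===== SOURCE B (Python) =====
-- from typing import List
--
--
-- def lc_2617_1(grid: List[List[int]]) -> int:
--     """Plain BFS over the grid: scan each reachable window directly instead of
--     maintaining per-row/per-column linked lists of unvisited cells."""
--     m, n = len(grid), len(grid[0])
--     dist = [[0] * n for _ in range(m)]
--     dist[0][0] = 1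
--     queue = [(0, 0)]
--     for i, j in queue:
--         d, x = dist[i][j], grid[i][j]
--         for jj in range(j + 1, min(j + x, n - 1) + 1):
--             if dist[i][jj] == 0:
--                 dist[i][jj] = d + 1
--                 queue.append((i, jj))
--         for ii in range(i + 1, min(i + x, m - 1) + 1):
--             if dist[ii][j] == 0:
--                 dist[ii][j] = d + 1
--                 queue.append((ii, j))
--     return dist[-1][-1] or -1
-- ===== Notes on version B (the rewrite author's own statement) =====
-- stated objective: simpler
-- what changed: Replaced A's BFS with per-row/per-column linked lists of unvisited cells (pointer chasing plus lazy path compression) and a mid-loop early return by a plain BFS that scans each reachable window range(j+1, min(j+x,n-1)+1) directly with a growing list as queue and reads the answer off the distance matrix at the end; B is about a third of A's code.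
-- outside the precondition, e.g. on lc_2617_1([[3, 1], [1]]): A returns 3, B raises IndexError; on lc_2617_1([]): A raises IndexError, B raises IndexError
import Mathlib
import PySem

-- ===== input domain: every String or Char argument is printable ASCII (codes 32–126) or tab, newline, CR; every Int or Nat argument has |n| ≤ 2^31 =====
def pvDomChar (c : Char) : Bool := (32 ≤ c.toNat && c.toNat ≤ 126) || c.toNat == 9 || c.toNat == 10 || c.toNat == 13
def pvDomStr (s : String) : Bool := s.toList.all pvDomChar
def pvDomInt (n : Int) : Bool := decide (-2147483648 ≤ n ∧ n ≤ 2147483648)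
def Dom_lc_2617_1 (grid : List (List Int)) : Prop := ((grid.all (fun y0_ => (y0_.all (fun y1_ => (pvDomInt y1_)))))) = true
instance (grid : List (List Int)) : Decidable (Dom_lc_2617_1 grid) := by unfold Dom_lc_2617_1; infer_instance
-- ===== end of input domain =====

-- B replaces A's linked-list-skipping BFS by a plain BFS scanning each reachable window directly (simpler, not faster).

-- ===== PORT A =====
-- Matrices are Python lists of row lists; `math.inf` entries of `dis` are `none`.
abbrev MatO := List (List (Option Int))
def mgetO (mat : MatO) (i j : Nat) : Option Int := (mat.getD i []).getD j none
def msetO (mat : MatO) (i j : Nat) (v : Option Int) : MatO := mat.set i ((mat.getD i []).set j v)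
-- grid[i][j]; the default is never used on admitted inputs (indices are in range under Pre_)
def gget (grid : List (List Int)) (i j : Nat) : Int := (grid.getD i []).getD j 0
-- nex[k]; the default is never used (skip lists have full length)
def ngetN (nx : List Nat) (k : Nat) : Nat := nx.getD k (k + 1)

-- A's inner `while y <= j + x and 0 <= y < n` loop (identical for the row and the column block;
-- `cell y` is (i, y) resp. (y, j)).  `fuel = sz` always suffices: the skip pointers increase.
def chainA (cell : Nat → Nat × Nat) (tgt : Nat × Nat) (limit : Int) (sz : Nat) (d : Int) :
    Nat → List Nat → MatO → List (Nat × Nat) → List Nat → Nat →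
      MatO × List (Nat × Nat) × List Nat × Nat × Option Int
  | 0, _, dis, q, lst, y => (dis, q, lst, y, none)
  | fuel + 1, nx, dis, q, lst, y =>
    if (y : Int) ≤ limit ∧ y < sz then
      if mgetO dis (cell y).1 (cell y).2 = none then
        if cell y = tgt then
          (msetO dis (cell y).1 (cell y).2 (some (d + 1)), q, lst, y, some (d + 1))
        else
          chainA cell tgt limit sz d fuel nx
            (msetO dis (cell y).1 (cell y).2 (some (d + 1))) (q ++ [cell y]) (lst ++ [y]) (ngetN nx y)
      else chainA cell tgt limit sz d fuel nx dis q (lst ++ [y]) (ngetN nx y)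
    else (dis, q, lst, y, none)

-- `for w in lst: nex[w] = y`
def compress (nx : List Nat) (lst : List Nat) (y : Nat) : List Nat :=
  lst.foldl (fun a w => a.set w y) nx

-- `ans = dis[-1][-1]; return ans if ans < math.inf else -1`
def finishA (dis : MatO) (m n : Nat) : Int :=
  match mgetO dis (m - 1) (n - 1) with
  | some v => v
  | none => -1

-- A's `while stack:` loop; fuel m*n+1 suffices (each cell is enqueued at most once).
def loopA (grid : List (List Int)) (m n : Nat) :
    Nat → MatO → List (List Nat) → List (List Nat) → List (Nat × Nat) → Int
  | 0, dis, _, _, _ => finishA dis m n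
  | fuel + 1, dis, rowNex, colNex, queue =>
    match queue with
    | [] => finishA dis m n
    | (i, j) :: qs =>
      let d := (mgetO dis i j).getD 0   -- popped cells are always marked; default unused
      let x := gget grid i j
      if x = 0 then loopA grid m n fuel dis rowNex colNex qs
      else
        let nx := rowNex.getD i []
        match chainA (fun y => (i, y)) (m - 1, n - 1) ((j : Int) + x) n d n nx dis qs [] (ngetN nx j) with
        | (_, _, _, _, some v) => v
        | (dis1, q1, lst1, y1, none) =>
          let cx := colNex.getD j []
          match chainA (fun y => (y, j)) (m - 1, n - 1) ((i : Int) + x) m d m cx dis1 q1 [] (ngetN cx i) with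
          | (_, _, _, _, some v) => v
          | (dis2, q2, lst2, y2, none) =>
            loopA grid m n fuel dis2 (rowNex.set i (compress nx lst1 y1))
              (colNex.set j (compress cx lst2 y2)) q2

def lc_2617_1 (grid : List (List Int)) : Int :=
  let m := grid.length
  let n := (grid.getD 0 []).length
  loopA grid m n (m * n + 1)
    (msetO (List.replicate m (List.replicate n (none : Option Int))) 0 0 (some 1))
    (List.replicate m (List.range' 1 n)) (List.replicate n (List.range' 1 m)) [(0, 0)]

-- ===== PORT B =====
abbrev MatI := List (List Int)
def mgetI (mat : MatI) (i j : Nat) : Int := (mat.getD i []).getD j 0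
def msetI (mat : MatI) (i j : Nat) (v : Int) : MatI := mat.set i ((mat.getD i []).set j v)

-- one inner `for` of B: scan the listed cells, mark the unvisited ones and enqueue them
def scanB (d : Int) (s : MatI × List (Nat × Nat)) (cells : List (Nat × Nat)) :
    MatI × List (Nat × Nat) :=
  cells.foldl
    (fun s c => if mgetI s.1 c.1 c.2 = 0 then (msetI s.1 c.1 c.2 (d + 1), s.2 ++ [c]) else s) s

-- the cells of Python's `range(lo, min(hi, sz - 1) + 1)` mapped through `cell` (exact: lo ≥ 1 here)
def rangeCells (cell : Nat → Nat × Nat) (lo : Nat) (hi : Int) (sz : Nat) : List (Nat × Nat) :=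
  (List.range' lo ((min hi ((sz : Int) - 1) + 1).toNat - lo)).map cell

-- B's `for i, j in queue:` over the growing list = recursion on pending ++ appended
def loopB (grid : List (List Int)) (m n : Nat) : Nat → MatI → List (Nat × Nat) → MatI
  | 0, dis, _ => dis
  | _ + 1, dis, [] => dis
  | fuel + 1, dis, (i, j) :: rest =>
    let d := mgetI dis i j
    let x := gget grid i j
    let s1 := scanB d (dis, rest) (rangeCells (fun y => (i, y)) (j + 1) ((j : Int) + x) n)
    let s2 := scanB d s1 (rangeCells (fun y => (y, j)) (i + 1) ((i : Int) + x) m)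
    loopB grid m n fuel s2.1 s2.2

def lc_2617_1_alt (grid : List (List Int)) : Int :=
  let m := grid.length
  let n := (grid.getD 0 []).length
  let v := mgetI
    (loopB grid m n (m * n + 1)
      (msetI (List.replicate m (List.replicate n (0 : Int))) 0 0 1) [(0, 0)])
    (m - 1) (n - 1)
  if v = 0 then -1 else v   -- `return dist[-1][-1] or -1`

-- ===== PRECONDITION & SPEC =====
-- Python A raises IndexError on [] / [[]] and may index a row shorter than len(grid[0]);
-- Pre_ admits every nonempty grid whose rows all have at least len(grid[0]) > 0 entries.
def Pre_lc_2617_1 (grid : List (List Int)) : Prop :=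
  grid ≠ [] ∧ 0 < (grid.headD []).length ∧ ∀ r ∈ grid, (grid.headD []).length ≤ r.length
instance (grid : List (List Int)) : Decidable (Pre_lc_2617_1 grid) := by
  unfold Pre_lc_2617_1; infer_instance

def pvWitness_lc_2617_1 : List (List Int) := [[2, 1], [1, 1]]

def Spec_lc_2617_1 (grid : List (List Int)) (out : Int) : Prop := out = lc_2617_1_alt grid
instance (grid : List (List Int)) (out : Int) : Decidable (Spec_lc_2617_1 grid out) := by
  unfold Spec_lc_2617_1; infer_instance

-- ===== CLAIM (what is proved, stated in full; the proofs are below) =====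
def Claim_equal_lc_2617_1 : Prop := ∀ (grid : List (List Int)), Dom_lc_2617_1 grid → Pre_lc_2617_1 grid → Spec_lc_2617_1 grid (lc_2617_1 grid)

-- ===== LEMMAS AND PROOFS =====

-- ---------- generic list access lemmas ----------

theorem pv_getD_map {α β : Type} (f : α → β) (l : List α) (i : Nat) (d : α) :
    (l.map f).getD i (f d) = f (l.getD i d) := by
  simp only [List.getD_eq_getElem?_getD, List.getElem?_map]
  cases l[i]? <;> simp

theorem pv_getD_set_self {α : Type} (l : List α) (i : Nat) (a d : α) (h : i < l.length) :
    (l.set i a).getD i d = a := by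
  simp [List.getD_eq_getElem?_getD, h]

theorem pv_getD_set_ne {α : Type} (l : List α) (i i' : Nat) (a d : α) (h : i ≠ i') :
    (l.set i a).getD i' d = l.getD i' d := by
  simp [List.getD_eq_getElem?_getD, h]

-- ---------- matrix access lemmas ----------

def ShapeO (dis : MatO) (m n : Nat) : Prop := dis.length = m ∧ ∀ r ∈ dis, r.length = n

theorem pv_getD_lt {α : Type} (l : List α) {i : Nat} (h : i < l.length) (d : α) :
    l.getD i d = l[i] := by
  rw [List.getD_eq_getElem?_getD, List.getElem?_eq_getElem h]; rfl

theorem pv_getD_map' {α β : Type} (f : α → β) (l : List α) (i : Nat) (d : α) (d' : β)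
    (hd : f d = d') : (l.map f).getD i d' = f (l.getD i d) := by
  subst hd; exact pv_getD_map f l i d

theorem shape_getD {dis : MatO} {m n : Nat} (h : ShapeO dis m n) {i : Nat} (hi : i < m) :
    (dis.getD i []).length = n := by
  have hi' : i < dis.length := h.1 ▸ hi
  rw [pv_getD_lt dis hi']
  exact h.2 _ (List.getElem_mem hi')

theorem msetO_oob {dis : MatO} {i j : Nat}
    (h : ¬(i < dis.length ∧ j < (dis.getD i []).length)) (v : Option Int) :
    msetO dis i j v = dis := by
  unfold msetO
  by_cases hi : i < dis.length
  · have hj : (dis.getD i []).length ≤ j := by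
      rcases Nat.lt_or_ge j (dis.getD i []).length with h' | h'
      · exact absurd ⟨hi, h'⟩ h
      · exact h'
    rw [List.set_eq_of_length_le hj, pv_getD_lt dis hi]
    exact List.set_getElem_self hi
  · rw [List.set_eq_of_length_le (by omega)]

theorem shape_msetO {dis : MatO} {m n : Nat} (h : ShapeO dis m n) (i j : Nat) (v : Option Int) :
    ShapeO (msetO dis i j v) m n := by
  by_cases hr : i < dis.length
  · refine ⟨by simp [msetO, h.1], fun r hrm => ?_⟩
    rcases List.mem_or_eq_of_mem_set hrm with h' | h'
    · exact h.2 _ h'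
    · subst h'
      rw [List.length_set]
      exact h.2 _ (by rw [pv_getD_lt dis hr]; exact List.getElem_mem hr)
  · unfold msetO
    rw [List.set_eq_of_length_le (by omega)]
    exact h

theorem mgetO_msetO_self {dis : MatO} {i j : Nat} (hi : i < dis.length)
    (hj : j < (dis.getD i []).length) (v : Option Int) :
    mgetO (msetO dis i j v) i j = v := by
  unfold mgetO msetO
  rw [pv_getD_set_self _ _ _ _ hi, pv_getD_set_self _ _ _ _ hj]

theorem mgetO_msetO_ne {dis : MatO} {i j i' j' : Nat} (h : ¬(i' = i ∧ j' = j)) (v : Option Int) :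
    mgetO (msetO dis i j v) i' j' = mgetO dis i' j' := by
  unfold mgetO msetO
  by_cases hi : i = i'
  · subst hi
    have hj : j ≠ j' := by tauto
    by_cases hlen : i < dis.length
    · rw [pv_getD_set_self _ _ _ _ hlen, pv_getD_set_ne _ _ _ _ _ hj]
    · rw [List.set_eq_of_length_le (by omega)]
  · rw [pv_getD_set_ne _ _ _ _ _ hi]

theorem mgetO_msetO_cases (dis : MatO) (i j i' j' : Nat) (v : Option Int) :
    mgetO (msetO dis i j v) i' j' = mgetO dis i' j' ∨ mgetO (msetO dis i j v) i' j' = v := by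
  by_cases h : i' = i ∧ j' = j
  · by_cases hr : i < dis.length ∧ j < (dis.getD i []).length
    · right; rcases h with ⟨h1, h2⟩; subst h1; subst h2; exact mgetO_msetO_self hr.1 hr.2 v
    · left; rw [msetO_oob hr]
  · left; exact mgetO_msetO_ne h v

theorem mgetI_msetI_ne {dis : MatI} {i j i' j' : Nat} (h : ¬(i' = i ∧ j' = j)) (v : Int) :
    mgetI (msetI dis i j v) i' j' = mgetI dis i' j' := by
  unfold mgetI msetI
  by_cases hi : i = i'
  · subst hi
    have hj : j ≠ j' := by tauto
    by_cases hlen : i < dis.length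
    · rw [pv_getD_set_self _ _ _ _ hlen, pv_getD_set_ne _ _ _ _ _ hj]
    · rw [List.set_eq_of_length_le (by omega)]
  · rw [pv_getD_set_ne _ _ _ _ _ hi]

-- ---------- the Option-matrix image of B's Int matrix ----------

def toI (dis : MatO) : MatI := dis.map (List.map (fun o => o.getD 0))

theorem mgetI_toI (dis : MatO) (i j : Nat) : mgetI (toI dis) i j = (mgetO dis i j).getD 0 := by
  unfold mgetI toI mgetO
  rw [pv_getD_map' (List.map fun o => Option.getD o 0) dis i [] [] rfl,
    pv_getD_map' (fun o => Option.getD o 0) _ j none 0 rfl]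

theorem toI_msetO (dis : MatO) (i j : Nat) (v : Option Int) :
    toI (msetO dis i j v) = msetI (toI dis) i j (v.getD 0) := by
  unfold toI msetO msetI
  rw [List.map_set, List.map_set]
  congr 2
  rw [pv_getD_map' (List.map fun o => Option.getD o 0) dis i [] [] rfl]

def PosM (dis : MatO) : Prop := ∀ i j v, mgetO dis i j = some v → 1 ≤ v

theorem posM_msetO {dis : MatO} (h : PosM dis) {w : Int} (hw : 1 ≤ w) (i j : Nat) :
    PosM (msetO dis i j (some w)) := by
  intro i' j' v hv
  rcases mgetO_msetO_cases dis i j i' j' (some w) with hc | hc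
  · exact h i' j' v (hc ▸ hv)
  · rw [hc] at hv; cases hv; exact hw

theorem mgetI_toI_zero {dis : MatO} (h : PosM dis) (i j : Nat) :
    (mgetI (toI dis) i j = 0) ↔ mgetO dis i j = none := by
  rw [mgetI_toI]
  cases hv : mgetO dis i j with
  | none => simp
  | some v => have := h i j v hv; simp; omega

-- ---------- skip-list validity ----------

def ValidNex (nx : List Nat) (vis : Nat → Option Int) (sz : Nat) : Prop :=
  nx.length = sz ∧ ∀ k, k < sz → k < ngetN nx k ∧ ngetN nx k ≤ sz ∧
    ∀ t, k < t → t < ngetN nx k → vis t ≠ none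

theorem validNex_mono {nx : List Nat} {vis vis' : Nat → Option Int} {sz : Nat}
    (h : ∀ t, vis t ≠ none → vis' t ≠ none) (hv : ValidNex nx vis sz) :
    ValidNex nx vis' sz := by
  refine ⟨hv.1, fun k hk => ⟨(hv.2 k hk).1, (hv.2 k hk).2.1, fun t h1 h2 => h t ((hv.2 k hk).2.2 t h1 h2)⟩⟩

-- ---------- compress ----------

theorem compress_length (nx : List Nat) (lst : List Nat) (y : Nat) :
    (compress nx lst y).length = nx.length := by
  induction lst generalizing nx with
  | nil => rfl
  | cons w lst ih => simp [compress] at ih ⊢; rw [ih, List.length_set]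

theorem ngetN_set (nx : List Nat) (w y k : Nat) :
    ngetN (nx.set w y) k = if k = w ∧ w < nx.length then y else ngetN nx k := by
  unfold ngetN
  by_cases hk : k = w
  · subst hk
    by_cases hl : k < nx.length
    · rw [if_pos ⟨rfl, hl⟩, pv_getD_set_self _ _ _ _ hl]
    · rw [if_neg (by tauto), List.set_eq_of_length_le (by omega)]
  · rw [if_neg (by tauto), pv_getD_set_ne _ _ _ _ _ (Ne.symm hk)]

theorem ngetN_compress (nx : List Nat) (lst : List Nat) (y k : Nat) :
    ngetN (compress nx lst y) k = if k ∈ lst ∧ k < nx.length then y else ngetN nx k := by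
  induction lst generalizing nx with
  | nil => simp [compress]
  | cons w lst ih =>
    show ngetN (compress (nx.set w y) lst y) k = _
    rw [ih, List.length_set, ngetN_set]
    by_cases h1 : k ∈ lst <;> by_cases h2 : k < nx.length <;> by_cases h3 : k = w <;>
      simp [h1, h2, h3, List.mem_cons] <;> (intro _ hlt hle; exact absurd hlt (by omega))

-- ---------- scanO : B's window scan lifted to the Option matrix ----------

def scanO (d : Int) (s : MatO × List (Nat × Nat)) (cells : List (Nat × Nat)) :
    MatO × List (Nat × Nat) :=
  cells.foldl
    (fun s c => if mgetO s.1 c.1 c.2 = none then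
        (msetO s.1 c.1 c.2 (some (d + 1)), s.2 ++ [c]) else s) s

theorem scanO_append (d : Int) (s : MatO × List (Nat × Nat)) (c1 c2 : List (Nat × Nat)) :
    scanO d s (c1 ++ c2) = scanO d (scanO d s c1) c2 := by
  unfold scanO; exact List.foldl_append

theorem scanO_mono (d : Int) (cells : List (Nat × Nat)) :
    ∀ (s : MatO × List (Nat × Nat)) (i j : Nat), mgetO s.1 i j ≠ none →
      mgetO (scanO d s cells).1 i j = mgetO s.1 i j := by
  induction cells with
  | nil => intro s i j _; rfl
  | cons c cells ih =>
    intro s i j h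
    show mgetO (scanO d (if mgetO s.1 c.1 c.2 = none then _ else s) cells).1 i j = _
    split
    · next hc =>
      have hne : ¬(i = c.1 ∧ j = c.2) := by
        rintro ⟨rfl, rfl⟩; exact h hc
      rw [ih _ i j (by rw [mgetO_msetO_ne hne]; exact h), mgetO_msetO_ne hne]
    · exact ih s i j h

theorem scanO_cons (d : Int) (s : MatO × List (Nat × Nat)) (c : Nat × Nat)
    (cells : List (Nat × Nat)) :
    scanO d s (c :: cells) = scanO d (if mgetO s.1 c.1 c.2 = none then
      (msetO s.1 c.1 c.2 (some (d + 1)), s.2 ++ [c]) else s) cells := rfl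

theorem scanO_shape {m n : Nat} (d : Int) (cells : List (Nat × Nat)) :
    ∀ (s : MatO × List (Nat × Nat)), ShapeO s.1 m n → ShapeO (scanO d s cells).1 m n := by
  induction cells with
  | nil => intro s h; exact h
  | cons c cells ih =>
    intro s h
    show ShapeO (scanO d (if mgetO s.1 c.1 c.2 = none then _ else s) cells).1 m n
    split
    · exact ih _ (shape_msetO h _ _ _)
    · exact ih s h

theorem scanO_posM (d : Int) (hd : 0 ≤ d) (cells : List (Nat × Nat)) :
    ∀ (s : MatO × List (Nat × Nat)), PosM s.1 → PosM (scanO d s cells).1 := by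
  induction cells with
  | nil => intro s h; exact h
  | cons c cells ih =>
    intro s h
    show PosM (scanO d (if mgetO s.1 c.1 c.2 = none then _ else s) cells).1
    split
    · exact ih _ (posM_msetO h (w := d + 1) (by omega) _ _)
    · exact ih s h

theorem scanO_queue {m n : Nat} (d : Int) (cells : List (Nat × Nat)) :
    ∀ (s : MatO × List (Nat × Nat)), ShapeO s.1 m n → (∀ c ∈ cells, c.1 < m ∧ c.2 < n) →
      ∃ extra, (scanO d s cells).2 = s.2 ++ extra ∧
        ∀ c ∈ extra, c ∈ cells ∧ mgetO (scanO d s cells).1 c.1 c.2 ≠ none := by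
  induction cells with
  | nil => intro s _ _; exact ⟨[], by simp [scanO]⟩
  | cons c cells ih =>
    intro s hsh hb
    rw [scanO_cons]
    by_cases hc : mgetO s.1 c.1 c.2 = none
    · rw [if_pos hc]
      rcases ih (msetO s.1 c.1 c.2 (some (d + 1)), s.2 ++ [c]) (shape_msetO hsh _ _ _)
        (fun c' h' => hb c' (List.mem_cons_of_mem _ h')) with ⟨extra, he, hp⟩
      refine ⟨c :: extra, by simpa using he, ?_⟩
      intro c' hc'
      rcases List.mem_cons.1 hc' with rfl | hmem
      · refine ⟨List.mem_cons_self, ?_⟩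
        have hin := hb c' List.mem_cons_self
        have h2 : mgetO (msetO s.1 c'.1 c'.2 (some (d + 1))) c'.1 c'.2 = some (d + 1) :=
          mgetO_msetO_self (by rw [hsh.1]; exact hin.1)
            (by rw [shape_getD hsh hin.1]; exact hin.2) _
      

        rw [scanO_mono d cells (msetO s.1 c'.1 c'.2 (some (d + 1)), s.2 ++ [c']) c'.1 c'.2
          (by rw [h2]; simp), h2]
        simp
      · exact ⟨List.mem_cons_of_mem _ (hp c' hmem).1, (hp c' hmem).2⟩
    · rw [if_neg hc]
      rcases ih s hsh (fun c' h' => hb c' (List.mem_cons_of_mem _ h')) with ⟨extra, he, hp⟩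
      exact ⟨extra, he, fun c' hc' => ⟨List.mem_cons_of_mem _ (hp c' hc').1, (hp c' hc').2⟩⟩

theorem scanO_skip (d : Int) (cells : List (Nat × Nat)) :
    ∀ (s : MatO × List (Nat × Nat)), (∀ c ∈ cells, mgetO s.1 c.1 c.2 ≠ none) →
      scanO d s cells = s := by
  induction cells with
  | nil => intro s _; rfl
  | cons c cells ih =>
    intro s h
    show scanO d (if mgetO s.1 c.1 c.2 = none then _ else s) cells = s
    rw [if_neg (h c List.mem_cons_self)]
    exact ih s fun c' hc' => h c' (List.mem_cons_of_mem _ hc')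

theorem scanB_toI (d : Int) (hd : 0 ≤ d) (cells : List (Nat × Nat)) :
    ∀ (dis : MatO) (q : List (Nat × Nat)), PosM dis →
      scanB d (toI dis, q) cells = (toI (scanO d (dis, q) cells).1, (scanO d (dis, q) cells).2) := by
  induction cells with
  | nil => intro dis q _; rfl
  | cons c cells ih =>
    intro dis q hpos
    by_cases hc : mgetO dis c.1 c.2 = none
    · have h0 : mgetI (toI dis) c.1 c.2 = 0 := (mgetI_toI_zero hpos _ _).2 hc
      have hL : scanB d (toI dis, q) (c :: cells) =
          scanB d (msetI (toI dis) c.1 c.2 (d + 1), q ++ [c]) cells := by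
        show scanB d (if mgetI (toI dis) c.1 c.2 = 0 then _ else _) cells = _
        rw [if_pos h0]
      have hR : scanO d (dis, q) (c :: cells) =
          scanO d (msetO dis c.1 c.2 (some (d + 1)), q ++ [c]) cells := by
        show scanO d (if mgetO dis c.1 c.2 = none then _ else _) cells = _
        rw [if_pos hc]
      rw [hL, hR, show msetI (toI dis) c.1 c.2 (d + 1) =
          toI (msetO dis c.1 c.2 (some (d + 1))) from (toI_msetO dis c.1 c.2 (some (d + 1))).symm]
      exact ih _ _ (posM_msetO hpos (w := d + 1) (by omega) _ _)
    · have h0 : ¬ mgetI (toI dis) c.1 c.2 = 0 := fun h => hc ((mgetI_toI_zero hpos _ _).1 h)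
      have hL : scanB d (toI dis, q) (c :: cells) = scanB d (toI dis, q) cells := by
        show scanB d (if mgetI (toI dis) c.1 c.2 = 0 then _ else _) cells = _
        rw [if_neg h0]
      have hR : scanO d (dis, q) (c :: cells) = scanO d (dis, q) cells := by
        show scanO d (if mgetO dis c.1 c.2 = none then _ else _) cells = _
        rw [if_neg hc]
      rw [hL, hR]
      exact ih dis q hpos

-- ---------- the chain scan of A = the window scan of B ----------

def topNat (limit : Int) (sz : Nat) : Nat := (min limit ((sz : Int) - 1) + 1).toNat

theorem topNat_le (limit : Int) (sz : Nat) : topNat limit sz ≤ sz := by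
  unfold topNat
  rcases le_total limit ((sz : Int) - 1) with h | h
  · rw [min_eq_left h]; omega
  · rw [min_eq_right h]; omega

theorem topNat_le_of_lt {limit : Int} {sz y : Nat} (h : limit < (y : Int)) :
    topNat limit sz ≤ y := by
  unfold topNat
  rcases le_total limit ((sz : Int) - 1) with h' | h'
  · rw [min_eq_left h']; omega
  · rw [min_eq_right h']; omega

theorem le_topNat {limit : Int} {sz y : Nat} (h1 : (y : Int) ≤ limit) (h2 : y < sz) :
    y + 1 ≤ topNat limit sz := by
  unfold topNat
  rcases le_total limit ((sz : Int) - 1) with h | h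
  · rw [min_eq_left h]; omega
  · rw [min_eq_right h]; omega

theorem scan_from_skip (cell : Nat → Nat × Nat) (d : Int) (dis : MatO) (q : List (Nat × Nat))
    (lo y0 topN : Nat) (hlo : lo ≤ y0)
    (hvis : ∀ t, lo ≤ t → t < y0 → mgetO dis (cell t).1 (cell t).2 ≠ none) :
    scanO d (dis, q) ((List.range' lo (topN - lo)).map cell) =
      scanO d (dis, q) ((List.range' y0 (topN - y0)).map cell) := by
  by_cases hy : y0 ≤ topN
  · have hsplit : List.range' lo (topN - lo) =
        List.range' lo (y0 - lo) ++ List.range' y0 (topN - y0) := by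
      have h := List.range'_append (s := lo) (m := y0 - lo) (n := topN - y0) (step := 1)
      rw [show lo + 1 * (y0 - lo) = y0 by omega] at h
      rw [show topN - lo = (y0 - lo) + (topN - y0) by omega]
      exact h.symm
    have hid := scanO_skip d ((List.range' lo (y0 - lo)).map cell) (dis, q) (by
      intro c hc
      rcases List.mem_map.1 hc with ⟨t, ht, rfl⟩
      rcases List.mem_range'.1 ht with ⟨idx, hidx, rfl⟩
      exact hvis _ (by omega) (by omega))
    rw [hsplit, List.map_append, scanO_append, hid]
  · have hid := scanO_skip d ((List.range' lo (topN - lo)).map cell) (dis, q) (by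
      intro c hc
      rcases List.mem_map.1 hc with ⟨t, ht, rfl⟩
      rcases List.mem_range'.1 ht with ⟨idx, hidx, rfl⟩
      exact hvis _ (by omega) (by omega))
    rw [show topN - y0 = 0 by omega, hid]
    rfl

def chainScan (cell : Nat → Nat × Nat) (limit : Int) (sz : Nat) (d : Int) (dis : MatO)
    (q : List (Nat × Nat)) (y : Nat) : MatO × List (Nat × Nat) :=
  scanO d (dis, q) ((List.range' y (topNat limit sz - y)).map cell)

theorem chainScan_mono (cell : Nat → Nat × Nat) (limit : Int) (sz : Nat) (d : Int) (dis : MatO)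
    (q : List (Nat × Nat)) (y : Nat) (i j : Nat) (h : mgetO dis i j ≠ none) :
    mgetO (chainScan cell limit sz d dis q y).1 i j = mgetO dis i j :=
  scanO_mono d _ (dis, q) i j h

-- what A's inner while-loop guarantees, phrased against B's window scan `chainScan`
def ChainPost (cell : Nat → Nat × Nat) (tgt : Nat × Nat) (limit : Int) (sz : Nat) (d : Int)
    (dis : MatO) (q : List (Nat × Nat)) (lst : List Nat) (y : Nat)
    (r : MatO × List (Nat × Nat) × List Nat × Nat × Option Int) : Prop :=
  (r.2.2.2.2 = none →
    r.1 = (chainScan cell limit sz d dis q y).1 ∧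
    r.2.1 = (chainScan cell limit sz d dis q y).2 ∧
    y ≤ r.2.2.2.1 ∧ r.2.2.2.1 ≤ sz ∧
    (∃ δ, r.2.2.1 = lst ++ δ ∧ ∀ w ∈ δ, y ≤ w ∧ w < r.2.2.2.1) ∧
    (∀ t, y ≤ t → t < r.2.2.2.1 →
      mgetO (chainScan cell limit sz d dis q y).1 (cell t).1 (cell t).2 ≠ none)) ∧
  (∀ v, r.2.2.2.2 = some v → v = d + 1 ∧
    mgetO (chainScan cell limit sz d dis q y).1 tgt.1 tgt.2 = some (d + 1))

theorem chain_main (cell : Nat → Nat × Nat) (tgt : Nat × Nat) (limit : Int) (sz : Nat)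
    (d : Int) (nx : List Nat) (m n : Nat)
    (Hb : ∀ t, t < sz → (cell t).1 < m ∧ (cell t).2 < n) :
    ∀ fuel y (dis : MatO) (q : List (Nat × Nat)) (lst : List Nat), ShapeO dis m n →
      ValidNex nx (fun t => mgetO dis (cell t).1 (cell t).2) sz →
      y ≤ sz → sz ≤ fuel + y →
      ChainPost cell tgt limit sz d dis q lst y
        (chainA cell tgt limit sz d fuel nx dis q lst y) := by
  intro fuel
  induction fuel with
  | zero =>
    intro y dis q lst hsh hv hy hf
    have hc0 : topNat limit sz - y = 0 := by have := topNat_le limit sz; omega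
    have hs : chainScan cell limit sz d dis q y = (dis, q) := by
      unfold chainScan; rw [hc0]; rfl
    have hstep : chainA cell tgt limit sz d 0 nx dis q lst y = (dis, q, lst, y, none) := rfl
    rw [hstep]
    unfold ChainPost
    rw [hs]
    exact ⟨fun _ => ⟨rfl, rfl, Nat.le_refl _, hy, ⟨[], by simp, by simp⟩,
      fun t h1 h2 => absurd (Nat.lt_of_lt_of_le h2 h1) (Nat.lt_irrefl t)⟩,
      fun v hv' => by simp at hv'⟩
  | succ fuel ih =>
    intro y dis q lst hsh hv hy hf
    by_cases hcond : (y : Int) ≤ limit ∧ y < sz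
    · obtain ⟨hylim, hysz⟩ := hcond
      have hytop : y + 1 ≤ topNat limit sz := le_topNat hylim hysz
      have hcells : List.range' y (topNat limit sz - y) =
          y :: List.range' (y + 1) (topNat limit sz - (y + 1)) := by
        rw [show topNat limit sz - y = (topNat limit sz - (y + 1)) + 1 by omega,
          List.range'_succ]
      have hsV := hv.2 y hysz
      by_cases hm : mgetO dis (cell y).1 (cell y).2 = none
      · -- the head cell y is unvisited: both sides mark it
        have hbnd := Hb y hysz
        have hd1y : mgetO (msetO dis (cell y).1 (cell y).2 (some (d + 1))) (cell y).1 (cell y).2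
            = some (d + 1) :=
          mgetO_msetO_self (by rw [hsh.1]; exact hbnd.1)
            (by rw [shape_getD hsh hbnd.1]; exact hbnd.2) _
        have hmono1 : ∀ t, mgetO dis (cell t).1 (cell t).2 ≠ none →
            mgetO (msetO dis (cell y).1 (cell y).2 (some (d + 1))) (cell t).1 (cell t).2 ≠ none := by
          intro t ht
          rcases mgetO_msetO_cases dis (cell y).1 (cell y).2 (cell t).1 (cell t).2 (some (d + 1))
            with hcc | hcc <;> rw [hcc]
          · exact ht
          · simp
        have hskip : ∀ t, y + 1 ≤ t → t < ngetN nx y →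
            mgetO (msetO dis (cell y).1 (cell y).2 (some (d + 1))) (cell t).1 (cell t).2 ≠ none :=
          fun t h1 h2 => hmono1 t (hsV.2.2 t (by omega) h2)
        have hbridge : chainScan cell limit sz d dis q y =
            chainScan cell limit sz d (msetO dis (cell y).1 (cell y).2 (some (d + 1)))
              (q ++ [cell y]) (ngetN nx y) := by
          unfold chainScan
          rw [hcells, List.map_cons, scanO_cons]
          rw [show mgetO (dis, q).1 (cell y).1 (cell y).2 = none from hm]
          rw [if_pos rfl]
          exact scan_from_skip cell d _ _ (y + 1) (ngetN nx y) (topNat limit sz)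
            (by omega) hskip
        by_cases htgt : cell y = tgt
        · -- A returns early; B's scan has just set the target to d + 1
          have hstep : chainA cell tgt limit sz d (fuel + 1) nx dis q lst y =
              (msetO dis (cell y).1 (cell y).2 (some (d + 1)), q, lst, y, some (d + 1)) := by
            simp only [chainA]
            rw [if_pos ⟨hylim, hysz⟩, if_pos hm, if_pos htgt]
          rw [hstep]
          unfold ChainPost
          refine ⟨fun h => by simp at h, fun v hv' => ?_⟩
          have hvv : v = d + 1 := by simpa using hv'.symm
          subst hvv
          refine ⟨rfl, ?_⟩
          rw [hbridge]
          rw [chainScan_mono _ _ _ _ _ _ _ _ _ (by rw [← htgt, hd1y]; simp), ← htgt, hd1y]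
        · -- A recurses along the skip list; B scans the cells in between (all visited)
          have hstep : chainA cell tgt limit sz d (fuel + 1) nx dis q lst y =
              chainA cell tgt limit sz d fuel nx
                (msetO dis (cell y).1 (cell y).2 (some (d + 1))) (q ++ [cell y]) (lst ++ [y])
                (ngetN nx y) := by
            simp only [chainA]
            rw [if_pos ⟨hylim, hysz⟩, if_pos hm, if_neg htgt]
          rw [hstep]
          have ihp := ih (ngetN nx y) (msetO dis (cell y).1 (cell y).2 (some (d + 1)))
            (q ++ [cell y]) (lst ++ [y]) (shape_msetO hsh _ _ _)
            (validNex_mono hmono1 hv) hsV.2.1 (by omega)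
          rcases hr : chainA cell tgt limit sz d fuel nx
              (msetO dis (cell y).1 (cell y).2 (some (d + 1))) (q ++ [cell y]) (lst ++ [y])
              (ngetN nx y) with ⟨dis', q', lst', y', e⟩
          rw [hr] at ihp
          unfold ChainPost at ihp ⊢
          rw [hbridge]
          cases e with
          | none =>
            obtain ⟨hA, hB, hC, hD, ⟨δ, hδ, hδp⟩, hE⟩ := ihp.1 rfl
            refine ⟨fun _ => ⟨hA, hB, by omega, hD, ⟨y :: δ, by simpa using hδ, ?_⟩, ?_⟩,
              fun v hv' => by simp at hv'⟩
            · intro w hw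
              rcases List.mem_cons.1 hw with rfl | hw'
              · exact ⟨Nat.le_refl _, by omega⟩
              · have := hδp w hw'
                exact ⟨by omega, this.2⟩
            · intro t h1t h2t
              rcases Nat.lt_or_ge t (ngetN nx y) with hlt | hge
              · rcases Nat.eq_or_lt_of_le h1t with rfl | hgt
                · rw [chainScan_mono _ _ _ _ _ _ _ _ _ (by rw [hd1y]; simp), hd1y]
                  simp
                · have hvt := hskip t (by omega) hlt
                  rw [chainScan_mono _ _ _ _ _ _ _ _ _ hvt]
                  exact hvt
              · exact hE t hge h2t
          | some v =>
            refine ⟨fun h => by simp at h, fun v' hv' => ?_⟩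
            have hvv : v' = v := by simpa using hv'.symm
            subst hvv
            exact ihp.2 v' rfl
      · -- the head cell y is already visited: A skips it via lst, B's scan skips it too
        have hskip : ∀ t, y + 1 ≤ t → t < ngetN nx y →
            mgetO dis (cell t).1 (cell t).2 ≠ none :=
          fun t h1 h2 => hsV.2.2 t (by omega) h2
        have hbridge : chainScan cell limit sz d dis q y =
            chainScan cell limit sz d dis q (ngetN nx y) := by
          unfold chainScan
          rw [hcells, List.map_cons, scanO_cons]
          rw [if_neg (by exact hm)]
          exact scan_from_skip cell d _ _ (y + 1) (ngetN nx y) (topNat limit sz)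
            (by omega) hskip
        have hstep : chainA cell tgt limit sz d (fuel + 1) nx dis q lst y =
            chainA cell tgt limit sz d fuel nx dis q (lst ++ [y]) (ngetN nx y) := by
          simp only [chainA]
          rw [if_pos ⟨hylim, hysz⟩, if_neg hm]
        rw [hstep]
        have ihp := ih (ngetN nx y) dis q (lst ++ [y]) hsh hv hsV.2.1 (by omega)
        rcases hr : chainA cell tgt limit sz d fuel nx dis q (lst ++ [y]) (ngetN nx y)
          with ⟨dis', q', lst', y', e⟩
        rw [hr] at ihp
        unfold ChainPost at ihp ⊢
        rw [hbridge]
        cases e with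
        | none =>
          obtain ⟨hA, hB, hC, hD, ⟨δ, hδ, hδp⟩, hE⟩ := ihp.1 rfl
          refine ⟨fun _ => ⟨hA, hB, by omega, hD, ⟨y :: δ, by simpa using hδ, ?_⟩, ?_⟩,
            fun v hv' => by simp at hv'⟩
          · intro w hw
            rcases List.mem_cons.1 hw with rfl | hw'
            · exact ⟨Nat.le_refl _, by omega⟩
            · have := hδp w hw'
              exact ⟨by omega, this.2⟩
          · intro t h1t h2t
            rcases Nat.lt_or_ge t (ngetN nx y) with hlt | hge
            · rcases Nat.eq_or_lt_of_le h1t with rfl | hgt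
              · rw [chainScan_mono _ _ _ _ _ _ _ _ _ hm]
                exact hm
              · have hvt := hskip t (by omega) hlt
                rw [chainScan_mono _ _ _ _ _ _ _ _ _ hvt]
                exact hvt
            · exact hE t hge h2t
        | some v =>
          refine ⟨fun h => by simp at h, fun v' hv' => ?_⟩
          have hvv : v' = v := by simpa using hv'.symm
          subst hvv
          exact ihp.2 v' rfl
    · -- window already exhausted: A stops at once, B's window is empty
      have hstep : chainA cell tgt limit sz d (fuel + 1) nx dis q lst y =
          (dis, q, lst, y, none) := by
        simp only [chainA]
        rw [if_neg hcond]
      rw [hstep]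
      have hc0 : topNat limit sz - y = 0 := by
        have h1 := topNat_le limit sz
        rcases Decidable.em ((y : Int) ≤ limit) with hA | hA
        · have hB : ¬ y < sz := fun h => hcond ⟨hA, h⟩
          omega
        · have h2 := topNat_le_of_lt (limit := limit) (sz := sz) (y := y) (by omega)
          omega
      have hs : chainScan cell limit sz d dis q y = (dis, q) := by
        unfold chainScan; rw [hc0]; rfl
      unfold ChainPost
      rw [hs]
      exact ⟨fun _ => ⟨rfl, rfl, Nat.le_refl _, hy, ⟨[], by simp, by simp⟩,
        fun t h1 h2 => absurd (Nat.lt_of_lt_of_le h2 h1) (Nat.lt_irrefl t)⟩,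
        fun v hv' => by simp at hv'⟩

-- ---------- B-side step equations and preservation ----------

theorem scanB_cons (d : Int) (s : MatI × List (Nat × Nat)) (c : Nat × Nat)
    (cells : List (Nat × Nat)) :
    scanB d s (c :: cells) = scanB d (if mgetI s.1 c.1 c.2 = 0 then
      (msetI s.1 c.1 c.2 (d + 1), s.2 ++ [c]) else s) cells := rfl

theorem scanB_preserve (d : Int) (cells : List (Nat × Nat)) :
    ∀ (s : MatI × List (Nat × Nat)) (i j : Nat), mgetI s.1 i j ≠ 0 →
      mgetI (scanB d s cells).1 i j = mgetI s.1 i j := by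
  induction cells with
  | nil => intro s i j _; rfl
  | cons c cells ih =>
    intro s i j h
    rw [scanB_cons]
    by_cases hc : mgetI s.1 c.1 c.2 = 0
    · rw [if_pos hc]
      have hne : ¬(i = c.1 ∧ j = c.2) := by rintro ⟨rfl, rfl⟩; exact h hc
      rw [ih (msetI s.1 c.1 c.2 (d + 1), s.2 ++ [c]) i j
        (by rw [show ((msetI s.1 c.1 c.2 (d + 1), s.2 ++ [c]) : MatI × _).1 =
            msetI s.1 c.1 c.2 (d + 1) from rfl, mgetI_msetI_ne hne]; exact h)]
      exact mgetI_msetI_ne hne _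
    · rw [if_neg hc]; exact ih s i j h

theorem loopB_cons (grid : List (List Int)) (m n fuel : Nat) (dis : MatI) (i j : Nat)
    (rest : List (Nat × Nat)) :
    loopB grid m n (fuel + 1) dis ((i, j) :: rest) =
      loopB grid m n fuel
        (scanB (mgetI dis i j) (scanB (mgetI dis i j) (dis, rest)
          (rangeCells (fun y => (i, y)) (j + 1) ((j : Int) + gget grid i j) n))
          (rangeCells (fun y => (y, j)) (i + 1) ((i : Int) + gget grid i j) m)).1
        (scanB (mgetI dis i j) (scanB (mgetI dis i j) (dis, rest)
          (rangeCells (fun y => (i, y)) (j + 1) ((j : Int) + gget grid i j) n))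
          (rangeCells (fun y => (y, j)) (i + 1) ((i : Int) + gget grid i j) m)).2 := rfl

theorem loopB_preserve (grid : List (List Int)) (m n : Nat) :
    ∀ fuel (dis : MatI) (queue : List (Nat × Nat)) (i j : Nat), mgetI dis i j ≠ 0 →
      mgetI (loopB grid m n fuel dis queue) i j = mgetI dis i j := by
  intro fuel
  induction fuel with
  | zero => intro dis queue i j _; rfl
  | succ fuel ih =>
    intro dis queue i j h
    match queue with
    | [] => rfl
    | (a, b) :: rest =>
      rw [loopB_cons]
      have p1 := scanB_preserve (mgetI dis a b)
        (rangeCells (fun y => (a, y)) (b + 1) ((b : Int) + gget grid a b) n) (dis, rest) i j h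
      have p2 := scanB_preserve (mgetI dis a b)
        (rangeCells (fun y => (y, b)) (a + 1) ((a : Int) + gget grid a b) m)
        (scanB (mgetI dis a b) (dis, rest)
          (rangeCells (fun y => (a, y)) (b + 1) ((b : Int) + gget grid a b) n)) i j
        (by rw [p1]; exact h)
      rw [ih _ _ i j (by rw [p2, p1]; exact h), p2, p1]

-- ---------- the outer loops in lockstep ----------

theorem rangeCells_eq (cell : Nat → Nat × Nat) (lo : Nat) (hi : Int) (sz : Nat) :
    rangeCells cell lo hi sz = (List.range' lo (topNat hi sz - lo)).map cell := rfl

theorem chainScan_shape {m n : Nat} (cell : Nat → Nat × Nat) (limit : Int) (sz : Nat)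
    (d : Int) (dis : MatO) (q : List (Nat × Nat)) (y : Nat) (h : ShapeO dis m n) :
    ShapeO (chainScan cell limit sz d dis q y).1 m n :=
  scanO_shape d _ (dis, q) h

theorem chainScan_posM (cell : Nat → Nat × Nat) (limit : Int) (sz : Nat) (d : Int)
    (hd : 0 ≤ d) (dis : MatO) (q : List (Nat × Nat)) (y : Nat) (h : PosM dis) :
    PosM (chainScan cell limit sz d dis q y).1 :=
  scanO_posM d hd _ (dis, q) h

theorem chainScan_queue {m n : Nat} (cell : Nat → Nat × Nat) (limit : Int) (sz : Nat)
    (d : Int) (dis : MatO) (q : List (Nat × Nat)) (y : Nat) (hsh : ShapeO dis m n)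
    (Hb : ∀ t, t < sz → (cell t).1 < m ∧ (cell t).2 < n) :
    ∃ extra, (chainScan cell limit sz d dis q y).2 = q ++ extra ∧
      ∀ c ∈ extra, (∃ t, t < sz ∧ c = cell t) ∧
        mgetO (chainScan cell limit sz d dis q y).1 c.1 c.2 ≠ none := by
  obtain ⟨extra, he, hp⟩ := scanO_queue d ((List.range' y (topNat limit sz - y)).map cell)
    (dis, q) hsh (by
      intro c hc
      rcases List.mem_map.1 hc with ⟨t, ht, rfl⟩
      rcases List.mem_range'.1 ht with ⟨idx, hidx, rfl⟩
      exact Hb _ (by have := topNat_le limit sz; omega))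
  refine ⟨extra, he, fun c hc => ⟨?_, (hp c hc).2⟩⟩
  rcases List.mem_map.1 (hp c hc).1 with ⟨t, ht, rfl⟩
  rcases List.mem_range'.1 ht with ⟨idx, hidx, rfl⟩
  exact ⟨y + 1 * idx, by have := topNat_le limit sz; omega, rfl⟩

theorem loopA_cons (grid : List (List Int)) (m n fuel : Nat) (dis : MatO)
    (rowNex colNex : List (List Nat)) (i j : Nat) (qs : List (Nat × Nat)) :
    loopA grid m n (fuel + 1) dis rowNex colNex ((i, j) :: qs) =
      (if gget grid i j = 0 then loopA grid m n fuel dis rowNex colNex qs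
       else
        match chainA (fun y => (i, y)) (m - 1, n - 1) ((j : Int) + gget grid i j) n ((mgetO dis i j).getD 0) n (rowNex.getD i []) dis qs [] (ngetN (rowNex.getD i []) j) with
        | (_, _, _, _, some v) => v
        | (dis1, q1, lst1, y1, none) =>
          match chainA (fun y => (y, j)) (m - 1, n - 1) ((i : Int) + gget grid i j) m ((mgetO dis i j).getD 0) m (colNex.getD j []) dis1 q1 [] (ngetN (colNex.getD j []) i) with
          | (_, _, _, _, some v) => v
          | (dis2, q2, lst2, y2, none) =>
            loopA grid m n fuel dis2 (rowNex.set i (compress (rowNex.getD i []) lst1 y1))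
              (colNex.set j (compress (colNex.getD j []) lst2 y2)) q2) := rfl

def outB (dis : MatI) (m n : Nat) : Int :=
  if mgetI dis (m - 1) (n - 1) = 0 then -1 else mgetI dis (m - 1) (n - 1)

theorem finish_eq {dis : MatO} (m n : Nat) (hpos : PosM dis) :
    finishA dis m n = outB (toI dis) m n := by
  unfold finishA outB
  rw [mgetI_toI]
  cases hv : mgetO dis (m - 1) (n - 1) with
  | none => rfl
  | some v =>
    have h1 := hpos _ _ _ hv
    show v = if (some v).getD 0 = 0 then -1 else (some v).getD 0
    rw [show (some v).getD 0 = v from rfl, if_neg (by omega)]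

def InvAB (m n : Nat) (dis : MatO) (rowNex colNex : List (List Nat))
    (queue : List (Nat × Nat)) : Prop :=
  ShapeO dis m n ∧ PosM dis ∧ rowNex.length = m ∧ colNex.length = n ∧
  (∀ i, i < m → ValidNex (rowNex.getD i []) (fun t => mgetO dis i t) n) ∧
  (∀ j, j < n → ValidNex (colNex.getD j []) (fun t => mgetO dis t j) m) ∧
  (∀ c ∈ queue, c.1 < m ∧ c.2 < n ∧ mgetO dis c.1 c.2 ≠ none)

theorem loop_main (grid : List (List Int)) (m n : Nat) :
    ∀ fuel (dis : MatO) (rowNex colNex : List (List Nat)) (queue : List (Nat × Nat)),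
      InvAB m n dis rowNex colNex queue →
      loopA grid m n fuel dis rowNex colNex queue =
        outB (loopB grid m n fuel (toI dis) queue) m n := by
  intro fuel
  induction fuel with
  | zero => intro dis rowNex colNex queue hInv; exact finish_eq m n hInv.2.1
  | succ fuel ih =>
    intro dis rowNex colNex queue hInv
    obtain ⟨hsh, hpos, hlenR, hlenC, hrowV, hcolV, hqOK⟩ := hInv
    match queue with
    | [] => exact finish_eq m n hpos
    | (i, j) :: qs =>
      obtain ⟨hi, hj, hne⟩ := hqOK (i, j) List.mem_cons_self
      have hdpos : 1 ≤ (mgetO dis i j).getD 0 := by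
        rcases Option.ne_none_iff_exists'.1 hne with ⟨dv, hdv⟩
        rw [hdv]
        exact hpos _ _ _ hdv
      have hdB : mgetI (toI dis) i j = (mgetO dis i j).getD 0 := mgetI_toI dis i j
      have hqs : ∀ c ∈ qs, c.1 < m ∧ c.2 < n ∧ mgetO dis c.1 c.2 ≠ none :=
        fun c hc => hqOK c (List.mem_cons_of_mem _ hc)
      by_cases hx : gget grid i j = 0
      · -- grid value 0: A skips the cell, B scans two empty windows
        have hcell1 : rangeCells (fun y => (i, y)) (j + 1) ((j : Int) + gget grid i j) n = [] := by
          rw [hx, rangeCells_eq, show topNat ((j : Int) + 0) n - (j + 1) = 0 from by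
            unfold topNat; rw [min_eq_left (by omega)]; omega]
          rfl
        have hcell2 : rangeCells (fun y => (y, j)) (i + 1) ((i : Int) + gget grid i j) m = [] := by
          rw [hx, rangeCells_eq, show topNat ((i : Int) + 0) m - (i + 1) = 0 from by
            unfold topNat; rw [min_eq_left (by omega)]; omega]
          rfl
        rw [loopA_cons, if_pos hx, loopB_cons, hcell1, hcell2]
        exact ih dis rowNex colNex qs ⟨hsh, hpos, hlenR, hlenC, hrowV, hcolV, hqs⟩
      · -- grid value ≠ 0: relate A's two chain walks to B's two window scans
        have hvR := hrowV i hi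
        have hjy := hvR.2 j hj
        have hcpR := chain_main (fun y => (i, y)) (m - 1, n - 1) ((j : Int) + gget grid i j) n ((mgetO dis i j).getD 0) (rowNex.getD i []) m n
          (fun t ht => ⟨hi, ht⟩) n (ngetN (rowNex.getD i []) j) dis qs [] hsh hvR hjy.2.1 (by omega)
        have hbridgeR : scanO ((mgetO dis i j).getD 0) (dis, qs) (rangeCells (fun y => (i, y)) (j + 1) ((j : Int) + gget grid i j) n) = chainScan (fun y => (i, y)) ((j : Int) + gget grid i j) n ((mgetO dis i j).getD 0) dis qs (ngetN (rowNex.getD i []) j) := by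
          rw [rangeCells_eq]
          exact scan_from_skip _ _ dis qs (j + 1) _ _ (by omega)
            (fun t h1 h2 => hjy.2.2 t (by omega) h2)
        have hs1 : scanB ((mgetO dis i j).getD 0) (toI dis, qs) (rangeCells (fun y => (i, y)) (j + 1) ((j : Int) + gget grid i j) n) = (toI (chainScan (fun y => (i, y)) ((j : Int) + gget grid i j) n ((mgetO dis i j).getD 0) dis qs (ngetN (rowNex.getD i []) j)).1, (chainScan (fun y => (i, y)) ((j : Int) + gget grid i j) n ((mgetO dis i j).getD 0) dis qs (ngetN (rowNex.getD i []) j)).2) := by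
          rw [scanB_toI ((mgetO dis i j).getD 0) (by omega) (rangeCells (fun y => (i, y)) (j + 1) ((j : Int) + gget grid i j) n) dis qs hpos, hbridgeR]
        rcases hrow : chainA (fun y => (i, y)) (m - 1, n - 1) ((j : Int) + gget grid i j) n ((mgetO dis i j).getD 0) n (rowNex.getD i []) dis qs [] (ngetN (rowNex.getD i []) j) with ⟨dis1, q1, lst1, y1, e1⟩
        rw [hrow] at hcpR
        cases e1 with
        | some v =>
          -- A returned from inside the row loop
          obtain ⟨hv1, hv2⟩ := hcpR.2 v rfl
          have hv2' : mgetO (chainScan (fun y => (i, y)) ((j : Int) + gget grid i j) n ((mgetO dis i j).getD 0) dis qs (ngetN (rowNex.getD i []) j)).1 (m - 1) (n - 1) = some ((mgetO dis i j).getD 0 + 1) := hv2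
          rw [loopA_cons, if_neg hx, hrow, loopB_cons, hdB, hs1]
          have hmark : mgetI (toI (chainScan (fun y => (i, y)) ((j : Int) + gget grid i j) n ((mgetO dis i j).getD 0) dis qs (ngetN (rowNex.getD i []) j)).1) (m - 1) (n - 1) = (mgetO dis i j).getD 0 + 1 := by
            rw [mgetI_toI, hv2']; rfl
          have hmarkne : mgetI (toI (chainScan (fun y => (i, y)) ((j : Int) + gget grid i j) n ((mgetO dis i j).getD 0) dis qs (ngetN (rowNex.getD i []) j)).1) (m - 1) (n - 1) ≠ 0 := by rw [hmark]; omega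
          have p2 := scanB_preserve ((mgetO dis i j).getD 0) (rangeCells (fun y => (y, j)) (i + 1) ((i : Int) + gget grid i j) m) (toI (chainScan (fun y => (i, y)) ((j : Int) + gget grid i j) n ((mgetO dis i j).getD 0) dis qs (ngetN (rowNex.getD i []) j)).1, (chainScan (fun y => (i, y)) ((j : Int) + gget grid i j) n ((mgetO dis i j).getD 0) dis qs (ngetN (rowNex.getD i []) j)).2)
            (m - 1) (n - 1) hmarkne
          have p3 := loopB_preserve grid m n fuel (scanB ((mgetO dis i j).getD 0) (toI (chainScan (fun y => (i, y)) ((j : Int) + gget grid i j) n ((mgetO dis i j).getD 0) dis qs (ngetN (rowNex.getD i []) j)).1, (chainScan (fun y => (i, y)) ((j : Int) + gget grid i j) n ((mgetO dis i j).getD 0) dis qs (ngetN (rowNex.getD i []) j)).2) (rangeCells (fun y => (y, j)) (i + 1) ((i : Int) + gget grid i j) m)).1 (scanB ((mgetO dis i j).getD 0) (toI (chainScan (fun y => (i, y)) ((j : Int) + gget grid i j) n ((mgetO dis i j).getD 0) dis qs (ngetN (rowNex.getD i []) j)).1, (chainScan (fun y => (i, y)) ((j : Int) + gget grid i j) n ((mgetO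 dis i j).getD 0) dis qs (ngetN (rowNex.getD i []) j)).2) (rangeCells (fun y => (y, j)) (i + 1) ((i : Int) + gget grid i j) m)).2 (m - 1) (n - 1)
            (by rw [p2]; exact hmarkne)
          show v = outB _ m n
          unfold outB
          rw [p3, p2, hmark, if_neg (by omega), hv1]
        | none =>
          obtain ⟨hA1, hB1, hyy1, hy1n, ⟨δ1, hδ1, hδp1⟩, hE1⟩ := hcpR.1 rfl
          dsimp only at hA1 hB1 hyy1 hy1n hδ1 hδp1 hE1
          have shape1 : ShapeO dis1 m n := by rw [hA1]; exact chainScan_shape _ _ _ _ _ _ _ hsh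
          have posM1 : PosM dis1 := by
            rw [hA1]; exact chainScan_posM _ _ _ _ (by omega) _ _ _ hpos
          have mono1 : ∀ a b, mgetO dis a b ≠ none → mgetO dis1 a b ≠ none := by
            intro a b h
            rw [hA1, chainScan_mono _ _ _ _ _ _ _ a b h]
            exact h
          have valid1C : ∀ j', j' < n →
              ValidNex (colNex.getD j' []) (fun t => mgetO dis1 t j') m :=
            fun j' hj' => validNex_mono (fun t ht => mono1 t j' ht) (hcolV j' hj')
          have hiy := (valid1C j hj).2 i hi
          have hcpC := chain_main (fun y => (y, j)) (m - 1, n - 1) ((i : Int) + gget grid i j) m ((mgetO dis i j).getD 0) (colNex.getD j []) m n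
            (fun t ht => ⟨ht, hj⟩) m (ngetN (colNex.getD j []) i) dis1 q1 [] shape1 (valid1C j hj) hiy.2.1 (by omega)
          have hbridgeC : scanO ((mgetO dis i j).getD 0) (dis1, q1) (rangeCells (fun y => (y, j)) (i + 1) ((i : Int) + gget grid i j) m) = chainScan (fun y => (y, j)) ((i : Int) + gget grid i j) m ((mgetO dis i j).getD 0) dis1 q1 (ngetN (colNex.getD j []) i) := by
            rw [rangeCells_eq]
            exact scan_from_skip _ _ dis1 q1 (i + 1) _ _ (by omega)
              (fun t h1 h2 => hiy.2.2 t (by omega) h2)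
          have hs2 : scanB ((mgetO dis i j).getD 0) (toI dis1, q1) (rangeCells (fun y => (y, j)) (i + 1) ((i : Int) + gget grid i j) m) = (toI (chainScan (fun y => (y, j)) ((i : Int) + gget grid i j) m ((mgetO dis i j).getD 0) dis1 q1 (ngetN (colNex.getD j []) i)).1, (chainScan (fun y => (y, j)) ((i : Int) + gget grid i j) m ((mgetO dis i j).getD 0) dis1 q1 (ngetN (colNex.getD j []) i)).2) := by
            rw [scanB_toI ((mgetO dis i j).getD 0) (by omega) (rangeCells (fun y => (y, j)) (i + 1) ((i : Int) + gget grid i j) m) dis1 q1 posM1, hbridgeC]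
          rcases hcol : chainA (fun y => (y, j)) (m - 1, n - 1) ((i : Int) + gget grid i j) m ((mgetO dis i j).getD 0) m (colNex.getD j []) dis1 q1 [] (ngetN (colNex.getD j []) i) with ⟨dis2, q2, lst2, y2, e2⟩
          rw [hcol] at hcpC
          cases e2 with
          | some v =>
            -- A returned from inside the column loop
            obtain ⟨hv1, hv2⟩ := hcpC.2 v rfl
            have hv2' : mgetO (chainScan (fun y => (y, j)) ((i : Int) + gget grid i j) m ((mgetO dis i j).getD 0) dis1 q1 (ngetN (colNex.getD j []) i)).1 (m - 1) (n - 1) = some ((mgetO dis i j).getD 0 + 1) := hv2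
            rw [loopA_cons, if_neg hx, hrow]
            dsimp only
            rw [hcol, loopB_cons, hdB, hs1, ← hA1, ← hB1, hs2]
            have hmark : mgetI (toI (chainScan (fun y => (y, j)) ((i : Int) + gget grid i j) m ((mgetO dis i j).getD 0) dis1 q1 (ngetN (colNex.getD j []) i)).1) (m - 1) (n - 1) = (mgetO dis i j).getD 0 + 1 := by
              rw [mgetI_toI, hv2']; rfl
            have hmarkne : mgetI (toI (chainScan (fun y => (y, j)) ((i : Int) + gget grid i j) m ((mgetO dis i j).getD 0) dis1 q1 (ngetN (colNex.getD j []) i)).1) (m - 1) (n - 1) ≠ 0 := by rw [hmark]; omega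
            have p3 := loopB_preserve grid m n fuel (toI (chainScan (fun y => (y, j)) ((i : Int) + gget grid i j) m ((mgetO dis i j).getD 0) dis1 q1 (ngetN (colNex.getD j []) i)).1) ((chainScan (fun y => (y, j)) ((i : Int) + gget grid i j) m ((mgetO dis i j).getD 0) dis1 q1 (ngetN (colNex.getD j []) i)).2) (m - 1) (n - 1)
              hmarkne
            show v = outB _ m n
            unfold outB
            rw [p3, hmark, if_neg (by omega), hv1]
          | none =>
            obtain ⟨hA2, hB2, hyy2, hy2m, ⟨δ2, hδ2, hδp2⟩, hE2⟩ := hcpC.1 rfl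
            dsimp only at hA2 hB2 hyy2 hy2m hδ2 hδp2 hE2
            have mono2 : ∀ a b, mgetO dis1 a b ≠ none → mgetO dis2 a b ≠ none := by
              intro a b h
              rw [hA2, chainScan_mono _ _ _ _ _ _ _ a b h]
              exact h
            have mono12 : ∀ a b, mgetO dis a b ≠ none → mgetO dis2 a b ≠ none :=
              fun a b h => mono2 a b (mono1 a b h)
            have shape2 : ShapeO dis2 m n := by
              rw [hA2]; exact chainScan_shape _ _ _ _ _ _ _ shape1
            have posM2 : PosM dis2 := by
              rw [hA2]; exact chainScan_posM _ _ _ _ (by omega) _ _ _ posM1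
            have hδ1' : lst1 = δ1 := by simpa using hδ1
            have hδ2' : lst2 = δ2 := by simpa using hδ2
            have rowV2 : ∀ i', i' < m →
                ValidNex ((rowNex.set i (compress (rowNex.getD i []) lst1 y1)).getD i' [])
                  (fun t => mgetO dis2 i' t) n := by
              intro i' hi'
              by_cases hii : i' = i
              · rw [hii]
                rw [pv_getD_set_self _ _ _ _ (by rw [hlenR]; exact hi)]
                refine ⟨by rw [compress_length]; exact hvR.1, fun k hk => ?_⟩
                rw [ngetN_compress]
                by_cases hkin : k ∈ lst1 ∧ k < (rowNex.getD i []).length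
                · rw [if_pos hkin]
                  have hkδ : k ∈ δ1 := hδ1' ▸ hkin.1
                  have hkp := hδp1 k hkδ
                  refine ⟨hkp.2, hy1n, fun t h1 h2 => ?_⟩
                  have ht := hE1 t (by omega) h2
                  exact mono2 i t (by rw [hA1]; exact ht)
                · rw [if_neg hkin]
                  have hold := hvR.2 k hk
                  exact ⟨hold.1, hold.2.1, fun t h1 h2 => mono12 i t (hold.2.2 t h1 h2)⟩
              · rw [pv_getD_set_ne _ _ _ _ _ (Ne.symm hii)]
                exact validNex_mono (fun t ht => mono12 i' t ht) (hrowV i' hi')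
            have colV2 : ∀ j', j' < n →
                ValidNex ((colNex.set j (compress (colNex.getD j []) lst2 y2)).getD j' [])
                  (fun t => mgetO dis2 t j') m := by
              intro j' hj'
              by_cases hjj : j' = j
              · rw [hjj]
                rw [pv_getD_set_self _ _ _ _ (by rw [hlenC]; exact hj)]
                refine ⟨by rw [compress_length]; exact (valid1C j hj).1, fun k hk => ?_⟩
                rw [ngetN_compress]
                by_cases hkin : k ∈ lst2 ∧ k < (colNex.getD j []).length
                · rw [if_pos hkin]
                  have hkδ : k ∈ δ2 := hδ2' ▸ hkin.1
                  have hkp := hδp2 k hkδ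
                  refine ⟨hkp.2, hy2m, fun t h1 h2 => ?_⟩
                  have ht := hE2 t (by omega) h2
                  rw [hA2]
                  exact ht
                · rw [if_neg hkin]
                  have hold := (valid1C j hj).2 k hk
                  exact ⟨hold.1, hold.2.1, fun t h1 h2 => mono2 t j (hold.2.2 t h1 h2)⟩
              · rw [pv_getD_set_ne _ _ _ _ _ (Ne.symm hjj)]
                exact validNex_mono (fun t ht => mono2 t j' ht) (valid1C j' hj')
            have qOK2 : ∀ c ∈ q2, c.1 < m ∧ c.2 < n ∧ mgetO dis2 c.1 c.2 ≠ none := by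
              obtain ⟨ex2, hq2e, hq2p⟩ := chainScan_queue (fun y => (y, j)) ((i : Int) + gget grid i j) m ((mgetO dis i j).getD 0) dis1 q1 (ngetN (colNex.getD j []) i)
                shape1 (fun t ht => ⟨ht, hj⟩)
              obtain ⟨ex1, hq1e, hq1p⟩ := chainScan_queue (fun y => (i, y)) ((j : Int) + gget grid i j) n ((mgetO dis i j).getD 0) dis qs (ngetN (rowNex.getD i []) j)
                hsh (fun t ht => ⟨hi, ht⟩)
              intro c hc
              rw [hB2, hq2e] at hc
              rcases List.mem_append.1 hc with hc1 | hcx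
              · rw [hB1, hq1e] at hc1
                rcases List.mem_append.1 hc1 with hc0 | hcy
                · obtain ⟨b1, b2, b3⟩ := hqs c hc0
                  exact ⟨b1, b2, mono12 c.1 c.2 b3⟩
                · obtain ⟨⟨t, htn, rfl⟩, hmk⟩ := hq1p c hcy
                  exact ⟨hi, htn, mono2 _ _ (by rw [hA1]; exact hmk)⟩
              · obtain ⟨⟨t, htm, rfl⟩, hmk⟩ := hq2p c hcx
                refine ⟨htm, hj, ?_⟩
                rw [hA2]
                exact hmk
            rw [loopA_cons, if_neg hx, hrow]
            dsimp only
            rw [hcol]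
            dsimp only
            rw [loopB_cons, hdB, hs1, ← hA1, ← hB1, hs2, ← hA2, ← hB2]
            exact ih dis2 _ _ q2 ⟨shape2, posM2,
              by rw [List.length_set]; exact hlenR, by rw [List.length_set]; exact hlenC,
              rowV2, colV2, qOK2⟩

-- ---------- the initial state ----------

theorem mgetO_rep (m n i j : Nat) :
    mgetO (List.replicate m (List.replicate n (none : Option Int))) i j = none := by
  unfold mgetO
  rcases Nat.lt_or_ge i m with hi | hi
  · have h1 : (List.replicate m (List.replicate n (none : Option Int))).getD i [] =
        List.replicate n none := by
      rw [pv_getD_lt _ (by simpa using hi)]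
      exact List.getElem_replicate _
    rw [h1]
    rcases Nat.lt_or_ge j n with hj | hj
    · rw [pv_getD_lt _ (by simpa using hj)]
      exact List.getElem_replicate _
    · rw [List.getD_eq_getElem?_getD, List.getElem?_eq_none (by simpa using hj)]
      rfl
  · have h1 : (List.replicate m (List.replicate n (none : Option Int))).getD i [] = [] := by
      rw [List.getD_eq_getElem?_getD, List.getElem?_eq_none (by simpa using hi)]
      rfl
    rw [h1]
    rfl

theorem shape_rep (m n : Nat) :
    ShapeO (List.replicate m (List.replicate n (none : Option Int))) m n :=
  ⟨List.length_replicate, fun r hr => by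
    rw [List.eq_of_mem_replicate hr]; exact List.length_replicate⟩

theorem ngetN_range' (sz k : Nat) (hk : k < sz) : ngetN (List.range' 1 sz) k = k + 1 := by
  unfold ngetN
  rw [pv_getD_lt _ (by simpa using hk), List.getElem_range']
  omega

theorem valid_range' (sz : Nat) (vis : Nat → Option Int) :
    ValidNex (List.range' 1 sz) vis sz := by
  refine ⟨List.length_range', fun k hk => ?_⟩
  rw [ngetN_range' sz k hk]
  exact ⟨by omega, by omega, fun t h1 h2 => absurd h1 (by omega)⟩

theorem inv_init (m n : Nat) (hm : 0 < m) (hn : 0 < n) :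
    InvAB m n (msetO (List.replicate m (List.replicate n (none : Option Int))) 0 0 (some 1))
      (List.replicate m (List.range' 1 n)) (List.replicate n (List.range' 1 m)) [(0, 0)] := by
  have hsh0 := shape_rep m n
  have hmark : mgetO (msetO (List.replicate m (List.replicate n (none : Option Int)))
      0 0 (some 1)) 0 0 = some 1 :=
    mgetO_msetO_self (by rw [hsh0.1]; exact hm) (by rw [shape_getD hsh0 hm]; exact hn) _
  have hmono : ∀ a b, mgetO (msetO (List.replicate m (List.replicate n (none : Option Int)))
      0 0 (some 1)) a b = none ∨ mgetO (msetO (List.replicate m (List.replicate n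
      (none : Option Int))) 0 0 (some 1)) a b = some 1 := by
    intro a b
    rcases mgetO_msetO_cases (List.replicate m (List.replicate n (none : Option Int)))
      0 0 a b (some 1) with h | h
    · left; rw [h, mgetO_rep]
    · right; exact h
  refine ⟨shape_msetO hsh0 _ _ _, ?_, List.length_replicate, List.length_replicate, ?_, ?_, ?_⟩
  · intro a b v hv
    rcases hmono a b with h | h
    · rw [h] at hv; cases hv
    · rw [h] at hv; cases hv; omega
  · intro i hi
    rw [pv_getD_lt _ (by simpa using hi), List.getElem_replicate]
    exact valid_range' n _
  · intro j hj
    rw [pv_getD_lt _ (by simpa using hj), List.getElem_replicate]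
    exact valid_range' m _
  · intro c hc
    rcases List.mem_singleton.1 hc with rfl
    exact ⟨hm, hn, by rw [hmark]; simp⟩

theorem toI_init (m n : Nat) :
    msetI (List.replicate m (List.replicate n (0 : Int))) 0 0 1 =
      toI (msetO (List.replicate m (List.replicate n (none : Option Int))) 0 0 (some 1)) := by
  rw [toI_msetO]
  congr 1
  unfold toI
  rw [List.map_replicate, List.map_replicate]
  rfl

-- ===== VERDICT (by name: the statement is the Claim_ definition above) =====
theorem lc_2617_1_spec : Claim_equal_lc_2617_1 := by
  intro grid _ hpre
  unfold Spec_lc_2617_1 lc_2617_1 lc_2617_1_alt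
  obtain ⟨hne, hn0, _⟩ := hpre
  have hm : 0 < grid.length := by cases grid with | nil => exact absurd rfl hne | cons g gs => simp
  have hn : 0 < (grid.getD 0 []).length := by
    cases grid with | nil => exact absurd rfl hne | cons g gs => exact hn0
  dsimp only
  rw [toI_init grid.length (grid.getD 0 []).length]
  exact loop_main grid grid.length (grid.getD 0 []).length
    (grid.length * (grid.getD 0 []).length + 1) _ _ _ _
    (inv_init grid.length (grid.getD 0 []).length hm hn)
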